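-- pv_equiv track=rewrite | github.com/arnor-sigurdsson/EIR | snp_pred/models/models_cnn.py | find_no_cnn_resblocks_needed
-- ===== SOURCE A (Python) =====
-- from typing import List, Dict, Tuple, TYPE_CHECKING
--
-- def find_no_cnn_resblocks_needed(
--     width: int, stride: int, first_stride_expansion: int
-- ) -> List[int]:
--     """
--     Used in order to calculate / set up residual blocks specifications as a list
--     automatically when they are not passed in as CL args, based on the minimum
--     width after the resblock convolutions.
--
--     We have 2 resblocks per channel depth until we have a total of 8 blocks,
--     then the rest is put in the third depth index (following resnet convention).
--
--     That is with a base channel depth of 32, we have these depths in the list: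
--     [32, 64, 128, 256].
--
--     Examples
--     ------
--     3 blocks --> [2, 1]
--     7 blocks --> [2, 2, 2, 1]
--     10 blocks --> [2, 2, 4, 2]
--     """
--
--     min_size = 8 * stride
--     # account for first conv
--     cur_width = width // (stride * first_stride_expansion)
--
--     resblocks = [0] * 4
--     while cur_width >= min_size:
--         cur_no_blocks = sum(resblocks)
--
--         if cur_no_blocks >= 8:
--             resblocks[2] += 1
--         else:
--             cur_index = cur_no_blocks // 2
--             resblocks[cur_index] += 1
--
--         cur_width = cur_width // stride
--
--     return [i for i in resblocks if i != 0]
-- ===== SOURCE B (Python) =====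
-- def find_no_cnn_resblocks_needed(width, stride, first_stride_expansion):
--     min_size = 8 * stride
--     # account for first conv
--     cur_width = width // (stride * first_stride_expansion)
--
--     # pass 1: count the total number of blocks
--     n = 0
--     while cur_width >= min_size:
--         n += 1
--         cur_width = cur_width // stride
--
--     # pass 2: closed-form distribution of n blocks over the 4 depths
--     resblocks = [min(2, max(0, n - 2 * i)) for i in range(4)]
--     if n > 8:
--         resblocks[2] += n - 8
--     return [x for x in resblocks if x != 0]
-- ===== Notes on version B (the rewrite author's own statement) =====
-- stated objective: alternative
-- what changed: A's single loop interleaves counting with per-iteration distribution into the 4-slot list; B first only counts the halving steps, then builds the block list in one closed-form arithmetic pass (min(2, max(0, n-2i)) per depth, overflow beyond 8 into the third depth).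
-- outside the precondition, e.g. on find_no_cnn_resblocks_needed(-100, -2, 1): A returns [1], B returns [1]
import Mathlib
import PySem

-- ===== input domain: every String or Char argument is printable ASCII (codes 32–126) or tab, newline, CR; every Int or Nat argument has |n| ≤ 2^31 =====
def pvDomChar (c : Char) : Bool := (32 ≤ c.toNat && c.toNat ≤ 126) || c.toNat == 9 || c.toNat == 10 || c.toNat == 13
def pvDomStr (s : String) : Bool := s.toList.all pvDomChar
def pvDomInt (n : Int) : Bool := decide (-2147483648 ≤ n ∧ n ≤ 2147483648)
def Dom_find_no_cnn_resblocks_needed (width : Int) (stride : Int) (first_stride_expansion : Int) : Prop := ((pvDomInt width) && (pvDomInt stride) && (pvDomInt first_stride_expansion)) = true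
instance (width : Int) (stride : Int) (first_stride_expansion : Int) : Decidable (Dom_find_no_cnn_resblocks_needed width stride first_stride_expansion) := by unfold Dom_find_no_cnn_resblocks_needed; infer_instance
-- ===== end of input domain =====

-- B replaces A's interleaved count-and-distribute loop by a counting loop plus a
-- closed-form distribution pass (objective: alternative decomposition, same cost).

-- ===== PORT A =====
-- A's while loop, as structural recursion on a fuel bound (64 > the ≤ 33 iterations
-- possible inside Dom ∩ Pre_; fuel only makes the same computation total).
def pvLoopA (fuel : Nat) (stride min_size cur : Int) (r : List Int) : List Int :=
  match fuel with
  | 0 => r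
  | fuel + 1 =>
    if min_size ≤ cur then
      let cur_no_blocks := r.sum
      let r' :=
        if 8 ≤ cur_no_blocks then
          PySem.List.pySetD r 2 (PySem.List.pyGetD r 2 0 + 1)
        else
          let cur_index := PySem.Int.floordiv cur_no_blocks 2
          PySem.List.pySetD r cur_index (PySem.List.pyGetD r cur_index 0 + 1)
      pvLoopA fuel stride min_size (PySem.Int.floordiv cur stride) r'
    else r

def find_no_cnn_resblocks_needed (width : Int) (stride : Int) (first_stride_expansion : Int) : List Int :=
  let min_size := 8 * stride
  let cur_width := PySem.Int.floordiv width (stride * first_stride_expansion)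
  let resblocks := pvLoopA 64 stride min_size cur_width [0, 0, 0, 0]
  resblocks.filter (fun i => i != 0)

-- ===== PORT B =====
-- B's counting while loop, same fuel bound.
def pvLoopB (fuel : Nat) (stride min_size cur n : Int) : Int :=
  match fuel with
  | 0 => n
  | fuel + 1 =>
    if min_size ≤ cur then
      pvLoopB fuel stride min_size (PySem.Int.floordiv cur stride) (n + 1)
    else n

def find_no_cnn_resblocks_needed_alt (width : Int) (stride : Int) (first_stride_expansion : Int) : List Int :=
  let min_size := 8 * stride
  let cur_width := PySem.Int.floordiv width (stride * first_stride_expansion)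
  let n := pvLoopB 64 stride min_size cur_width 0
  let base := (List.range 4).map (fun i => min 2 (max 0 (n - 2 * (i : Int))))
  let resblocks :=
    if 8 < n then PySem.List.pySetD base 2 (PySem.List.pyGetD base 2 0 + (n - 8)) else base
  resblocks.filter (fun x => x != 0)

-- ===== PRECONDITION & SPEC =====
-- Pre_ restricts to the natural domain stride ≥ 2 (plus any input whose loop body never
-- runs): outside it A raises ZeroDivisionError (stride = 0 or first_stride_expansion = 0)
-- or, once the loop runs with stride ≤ 1, usually diverges — and where it does terminate
-- (stride < 0) its values are artefacts of floor division by a negative stride, outside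
-- the CNN's natural domain.
def Pre_find_no_cnn_resblocks_needed (width : Int) (stride : Int) (first_stride_expansion : Int) : Prop :=
  first_stride_expansion ≠ 0 ∧ stride ≠ 0 ∧
    (2 ≤ stride ∨ PySem.Int.floordiv width (stride * first_stride_expansion) < 8 * stride)
instance (width : Int) (stride : Int) (first_stride_expansion : Int) : Decidable (Pre_find_no_cnn_resblocks_needed width stride first_stride_expansion) := by unfold Pre_find_no_cnn_resblocks_needed; infer_instance

def pvWitness_find_no_cnn_resblocks_needed : Int × Int × Int := (128, 2, 1)

def Spec_find_no_cnn_resblocks_needed (width : Int) (stride : Int) (first_stride_expansion : Int) (out : List Int) : Prop := out = find_no_cnn_resblocks_needed_alt width stride first_stride_expansion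
instance (width : Int) (stride : Int) (first_stride_expansion : Int) (out : List Int) : Decidable (Spec_find_no_cnn_resblocks_needed width stride first_stride_expansion out) := by unfold Spec_find_no_cnn_resblocks_needed; infer_instance

-- ===== CLAIM (what is proved, stated in full; the proofs are below) =====
def Claim_equal_find_no_cnn_resblocks_needed : Prop := ∀ (width : Int) (stride : Int) (first_stride_expansion : Int), Dom_find_no_cnn_resblocks_needed width stride first_stride_expansion → Pre_find_no_cnn_resblocks_needed width stride first_stride_expansion → Spec_find_no_cnn_resblocks_needed width stride first_stride_expansion (find_no_cnn_resblocks_needed width stride first_stride_expansion)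

-- ===== LEMMAS AND PROOFS =====


lemma pvSet2 (a b c d v : Int) : PySem.List.pySetD [a, b, c, d] 2 v = [a, b, v, d] := by
  simp [PySem.List.pySetD, PySem.List.pySet?, PySem.List.pyIdx?]

lemma pvGet2 (a b c d : Int) : PySem.List.pyGetD [a, b, c, d] 2 0 = c := by
  simp [PySem.List.pyGetD, PySem.List.pyGet?, PySem.List.pyIdx?]

-- the distribution of n blocks over the four depths (B's closed form)
def pvDist (n : Int) : List Int :=
  [min 2 (max 0 n), min 2 (max 0 (n - 2)),
   min 2 (max 0 (n - 4)) + (if 8 < n then n - 8 else 0), min 2 (max 0 (n - 6))]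

lemma pvDist_sum (n : Int) (h : 0 ≤ n) : (pvDist n).sum = n := by
  simp only [pvDist, List.sum_cons, List.sum_nil]
  split_ifs <;> omega

lemma pvDist_step (n : Int) (h : 0 ≤ n) :
    (if 8 ≤ (pvDist n).sum then
        PySem.List.pySetD (pvDist n) 2 (PySem.List.pyGetD (pvDist n) 2 0 + 1)
      else
        let i := PySem.Int.floordiv (pvDist n).sum 2
        PySem.List.pySetD (pvDist n) i (PySem.List.pyGetD (pvDist n) i 0 + 1))
      = pvDist (n + 1) := by
  rw [pvDist_sum n h]
  by_cases h8 : 8 ≤ n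
  · rw [if_pos h8]
    have hd : pvDist n = [2, 2, 2 + (if 8 < n then n - 8 else 0), 2] := by
      simp only [pvDist, List.cons.injEq, and_true]
      refine ⟨by omega, by omega, by split_ifs <;> omega, by omega⟩
    rw [hd, pvGet2, pvSet2]
    simp only [pvDist, List.cons.injEq, and_true]
    refine ⟨by omega, by omega, by split_ifs <;> omega, by omega⟩
  · rw [if_neg h8]
    interval_cases n <;> decide

lemma pvLoop_agree (fuel : Nat) : ∀ (stride min_size cur n : Int), 0 ≤ n →
    pvLoopA fuel stride min_size cur (pvDist n)
      = pvDist (pvLoopB fuel stride min_size cur n) := by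
  induction fuel with
  | zero => intro _ _ _ _ _; rfl
  | succ fuel ih =>
    intro stride min_size cur n hn
    simp only [pvLoopA, pvLoopB]
    by_cases hc : min_size ≤ cur
    · rw [if_pos hc, if_pos hc]
      rw [show (if 8 ≤ (pvDist n).sum then
          PySem.List.pySetD (pvDist n) 2 (PySem.List.pyGetD (pvDist n) 2 0 + 1)
        else
          let i := PySem.Int.floordiv (pvDist n).sum 2
          PySem.List.pySetD (pvDist n) i (PySem.List.pyGetD (pvDist n) i 0 + 1))
          = pvDist (n + 1) from pvDist_step n hn]
      exact ih stride min_size (PySem.Int.floordiv cur stride) (n + 1) (by omega)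
    · rw [if_neg hc, if_neg hc]

lemma pvDist_build (n : Int) :
    (if 8 < n then
        PySem.List.pySetD ((List.range 4).map (fun i => min 2 (max 0 (n - 2 * (i : Int))))) 2
          (PySem.List.pyGetD ((List.range 4).map (fun i => min 2 (max 0 (n - 2 * (i : Int))))) 2 0
            + (n - 8))
      else (List.range 4).map (fun i => min 2 (max 0 (n - 2 * (i : Int)))))
      = pvDist n := by
  have hb : (List.range 4).map (fun i => min 2 (max 0 (n - 2 * (i : Int))))
      = [min 2 (max 0 n), min 2 (max 0 (n - 2)), min 2 (max 0 (n - 4)), min 2 (max 0 (n - 6))] := by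
    simp [List.range_succ]
  rw [hb]
  by_cases h8 : 8 < n
  · rw [if_pos h8, pvGet2, pvSet2]
    simp only [pvDist, List.cons.injEq, and_true, true_and]
    rw [if_pos h8]
  · rw [if_neg h8]
    simp only [pvDist, List.cons.injEq, and_true, true_and]
    rw [if_neg h8]
    omega

-- ===== VERDICT (by name: the statement is the Claim_ definition above) =====
theorem find_no_cnn_resblocks_needed_spec : Claim_equal_find_no_cnn_resblocks_needed := by
  intro width stride first_stride_expansion _ _
  unfold Spec_find_no_cnn_resblocks_needed
  unfold find_no_cnn_resblocks_needed find_no_cnn_resblocks_needed_alt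
  simp only []
  rw [show ([0, 0, 0, 0] : List Int) = pvDist 0 from by decide]
  rw [pvLoop_agree 64 stride (8 * stride)
    (PySem.Int.floordiv width (stride * first_stride_expansion)) 0 le_rfl]
  rw [pvDist_build]
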